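-- pv_equiv track=rewrite | github.com/pdGruby/cloupy | walter_lieth.py | distinguish_between_wet_and_dry
-- ===== SOURCE A (Python) =====
-- def distinguish_between_wet_and_dry(mean_temperature, precipitation):
--     corrected_precipitation = []
--     for preci in precipitation:
--         if preci < 100:
--             corrected_precipitation.append(preci / 2)
--         else:
--             corrected_precipitation.append(preci)
--
--     dry_months_indexes = []
--     wet_months_indexes = []
--
--     for index, preci in enumerate(corrected_precipitation):
--         if preci > mean_temperature[index]:
--             wet_months_indexes.append(index)
--         else:
--             dry_months_indexes.append(index)
--
--     wet_periods = []
--     period = []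
--     for i, index in enumerate(wet_months_indexes):
--         if i == 0:
--             period.append(index)
--         elif index - wet_months_indexes[i - 1] != 1:
--             period.append(wet_months_indexes[i - 1])
--             wet_periods.append((period[0], period[1]))
--             period.clear()
--
--             period.append(index)
--         else:
--             continue
--     if len(period) == 1:
--         wet_period_starts_with = period[0]
--         wet_period_ends_with = wet_months_indexes[-1]
--         wet_periods.append((wet_period_starts_with, wet_period_ends_with))
--
--     dry_periods = []
--     period = []
--     for i, index in enumerate(dry_months_indexes):
--         if i == 0:
--             period.append(index)
--         elif index - dry_months_indexes[i - 1] != 1: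
--             period.append(dry_months_indexes[i - 1])
--             dry_periods.append((period[0], period[1]))
--             period.clear()
--
--             period.append(index)
--         else:
--             continue
--     try:
--         if len(period) == 1:
--             dry_period_starts_with = period[0]
--             dry_period_ends_with = dry_months_indexes[-1]
--             dry_periods.append((dry_period_starts_with, dry_period_ends_with))
--     except KeyError:
--         pass
--
--     return wet_periods, dry_periods
-- ===== SOURCE B (Python) =====
-- def distinguish_between_wet_and_dry(mean_temperature, precipitation):
--     wet_periods = []
--     dry_periods = []
--     run_wet = None
--     run_start = 0
--     for index, p in enumerate(precipitation):
--         corrected = p / 2 if p < 100 else p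
--         is_wet = corrected > mean_temperature[index]
--         if run_wet is None:
--             run_wet = is_wet
--             run_start = index
--         elif is_wet != run_wet:
--             if run_wet:
--                 wet_periods.append((run_start, index - 1))
--             else:
--                 dry_periods.append((run_start, index - 1))
--             run_wet = is_wet
--             run_start = index
--     if run_wet is not None:
--         if run_wet:
--             wet_periods.append((run_start, len(precipitation) - 1))
--         else:
--             dry_periods.append((run_start, len(precipitation) - 1))
--     return wet_periods, dry_periods
-- ===== Notes on version B (the rewrite author's own statement) =====
-- stated objective: simpler
-- what changed: B replaces A's three sequential passes (build corrected list, split indices into wet/dry index lists, then run a separate gap-compression loop over each index list) by a single pass over the months that tracks the current run's class and start index and emits each period when the class flips.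
import Mathlib
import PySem

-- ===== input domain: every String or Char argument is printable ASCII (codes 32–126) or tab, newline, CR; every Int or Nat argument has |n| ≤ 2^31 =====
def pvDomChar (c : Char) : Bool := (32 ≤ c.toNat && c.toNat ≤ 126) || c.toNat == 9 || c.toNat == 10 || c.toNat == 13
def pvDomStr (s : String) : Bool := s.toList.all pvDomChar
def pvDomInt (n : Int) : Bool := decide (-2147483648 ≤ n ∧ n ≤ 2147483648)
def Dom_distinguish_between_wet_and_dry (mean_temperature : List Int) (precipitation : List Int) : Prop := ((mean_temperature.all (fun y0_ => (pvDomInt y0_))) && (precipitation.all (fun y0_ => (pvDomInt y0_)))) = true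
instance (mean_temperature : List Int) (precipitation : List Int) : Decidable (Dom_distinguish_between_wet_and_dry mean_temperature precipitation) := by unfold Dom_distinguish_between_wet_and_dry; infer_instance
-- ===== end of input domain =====

-- B does one run-tracking pass instead of A's three passes (objective: simpler); return values proved equal wherever Python A returns.
-- Floats: A stores preci/2 (exact binary float for |preci| ≤ 2^31) and only compares it with an int; both
-- ports carry DOUBLED corrected values and compare against 2*temperature, which is exact on Dom.

-- ===== PORT A =====
-- A-side helper: the fold step of A's period-compression loop ('for i, index in enumerate(...)').
-- state s = (periods so far, current 'period' list); x = (i, index); L is the index list being compressed.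
def aStep (L : List Int) (s : List (Int × Int) × List Int) (x : Int × Int) : List (Int × Int) × List Int :=
  if x.1 == 0 then (s.1, s.2 ++ [x.2])
  else if x.2 - (PySem.List.pyGet? L (x.1 - 1)).getD 0 ≠ 1 then
    -- index i-1 is always in range here (i ≥ 1), so the .getD 0 default is never used
    let per := s.2 ++ [(PySem.List.pyGet? L (x.1 - 1)).getD 0]
    (s.1 ++ [((PySem.List.pyGet? per 0).getD 0, (PySem.List.pyGet? per 1).getD 0)], [x.2])
  else s

-- A-side helper: A's trailing 'if len(period) == 1: ... append((period[0], L[-1]))'.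
-- (L[-1] is only read when the loop ran, so the .getD 0 default is never used.)
def aFlush (L : List Int) (s : List (Int × Int) × List Int) : List (Int × Int) :=
  if s.2.length == 1 then
    s.1 ++ [((PySem.List.pyGet? s.2 0).getD 0, (PySem.List.pyGet? L (-1)).getD 0)]
  else s.1

-- A-side helper: A's two textually identical compression loops (wet and dry), ported once.
-- (A's try/except KeyError around the dry flush is dead code and is not ported.)
def aCompress (L : List Int) : List (Int × Int) :=
  aFlush L ((PySem.List.enumerate L).foldl (aStep L) ([], []))

def distinguish_between_wet_and_dry (mean_temperature : List Int) (precipitation : List Int) : (List (Int × Int)) × (List (Int × Int)) :=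
  -- corrected_precipitation, carried doubled (preci/2 ↦ preci, preci ↦ 2*preci)
  let corrected2 := precipitation.foldl (fun acc p => if p < 100 then acc ++ [p] else acc ++ [2 * p]) []
  -- 'for index, preci in enumerate(corrected_precipitation)': split indices into (dry, wet)
  -- out-of-range temperature lookup = IndexError in Python, excluded by Pre_; .getD 0 is never used inside Pre_
  let cls := (PySem.List.enumerate corrected2).foldl
      (fun (s : List Int × List Int) x =>
        if x.2 > 2 * (PySem.List.pyGet? mean_temperature x.1).getD 0 then (s.1, s.2 ++ [x.1])
        else (s.1 ++ [x.1], s.2)) ([], [])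
  (aCompress cls.2, aCompress cls.1)

-- ===== PORT B =====
-- B-side helper: Source B's single loop 'for index, p in enumerate(precipitation)' as structural recursion
-- over precipitation carrying (index, wet_periods, dry_periods, run_wet, run_start).
def bLoop (mean_temperature : List Int) (idx : Int) (wet dry : List (Int × Int))
    (runWet : Option Bool) (runStart : Int) :
    List Int → List (Int × Int) × List (Int × Int) × Option Bool × Int
  | [] => (wet, dry, runWet, runStart)
  | p :: ps =>
    let c2 := if p < 100 then p else 2 * p   -- corrected, doubled
    let isWet := decide (c2 > 2 * (PySem.List.pyGet? mean_temperature idx).getD 0)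
    match runWet with
    | none => bLoop mean_temperature (idx + 1) wet dry (some isWet) idx ps
    | some rw =>
      if isWet ≠ rw then
        if rw then bLoop mean_temperature (idx + 1) (wet ++ [(runStart, idx - 1)]) dry (some isWet) idx ps
        else bLoop mean_temperature (idx + 1) wet (dry ++ [(runStart, idx - 1)]) (some isWet) idx ps
      else bLoop mean_temperature (idx + 1) wet dry (some rw) runStart ps

def distinguish_between_wet_and_dry_alt (mean_temperature : List Int) (precipitation : List Int) : (List (Int × Int)) × (List (Int × Int)) :=
  let r := bLoop mean_temperature 0 [] [] none 0 precipitation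
  -- final 'if run_wet is not None: append((run_start, len(precipitation) - 1))'
  match r.2.2.1 with
  | none => (r.1, r.2.1)
  | some rw =>
    if rw then (r.1 ++ [(r.2.2.2, (precipitation.length : Int) - 1)], r.2.1)
    else (r.1, r.2.1 ++ [(r.2.2.2, (precipitation.length : Int) - 1)])

-- ===== PRECONDITION & SPEC =====
-- Python A raises IndexError at mean_temperature[index] when precipitation is longer than
-- mean_temperature; exactly those inputs are excluded (B raises there too).
def Pre_distinguish_between_wet_and_dry (mean_temperature : List Int) (precipitation : List Int) : Prop :=
  precipitation.length ≤ mean_temperature.length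
instance (mean_temperature : List Int) (precipitation : List Int) : Decidable (Pre_distinguish_between_wet_and_dry mean_temperature precipitation) := by unfold Pre_distinguish_between_wet_and_dry; infer_instance

def pvWitness_distinguish_between_wet_and_dry : List Int × List Int := ([10, 20, 0], [5, 300, 0])

def Spec_distinguish_between_wet_and_dry (mean_temperature : List Int) (precipitation : List Int) (out : (List (Int × Int)) × (List (Int × Int))) : Prop := out = distinguish_between_wet_and_dry_alt mean_temperature precipitation
instance (mean_temperature : List Int) (precipitation : List Int) (out : (List (Int × Int)) × (List (Int × Int))) : Decidable (Spec_distinguish_between_wet_and_dry mean_temperature precipitation out) := by unfold Spec_distinguish_between_wet_and_dry; infer_instance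

-- ===== CLAIM (what is proved, stated in full; the proofs are below) =====
def Claim_equal_distinguish_between_wet_and_dry : Prop := ∀ (mean_temperature : List Int) (precipitation : List Int), Dom_distinguish_between_wet_and_dry mean_temperature precipitation → Pre_distinguish_between_wet_and_dry mean_temperature precipitation → Spec_distinguish_between_wet_and_dry mean_temperature precipitation (distinguish_between_wet_and_dry mean_temperature precipitation)

-- ===== LEMMAS AND PROOFS =====

-- doubled corrected value of one month's precipitation
def fCorr (p : Int) : Int := if p < 100 then p else 2 * p

-- classification bits: bitsP mt i ps = [month i is wet, month i+1 is wet, …]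
def bitsP (mt : List Int) (i : Int) : List Int → List Bool
  | [] => []
  | p :: ps => decide (fCorr p > 2 * (PySem.List.pyGet? mt i).getD 0) :: bitsP mt (i + 1) ps

-- positions (starting at n) whose bit equals t
def idxs (n : Int) (t : Bool) : List Bool → List Int
  | [] => []
  | b :: bs => (if b == t then [n] else []) ++ idxs (n + 1) t bs

-- reference: maximal runs; current run covers s..n with class b, cs are the bits of n+1, n+2, …
def gr (s : Int) (b : Bool) (n : Int) : List Bool → List (Int × Int × Bool)
  | [] => [(s, n, b)]
  | c :: cs => if c == b then gr s b (n + 1) cs else (s, n, b) :: gr (n + 1) c (n + 1) cs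

def select (t : Bool) (R : List (Int × Int × Bool)) : List (Int × Int) :=
  R.filterMap (fun r => if r.2.2 == t then some (r.1, r.2.1) else none)

-- functional form of A's compression loop
def cgo (start prev : Int) : List Int → List (Int × Int)
  | [] => [(start, prev)]
  | x :: xs => if x - prev ≠ 1 then (start, prev) :: cgo x x xs else cgo start x xs

def cgoTop : List Int → List (Int × Int)
  | [] => []
  | x :: xs => cgo x x xs

-- Source B's trailing flush, as a function of the final month index m and bLoop's result
def flushAt (m : Int) (r : List (Int × Int) × List (Int × Int) × Option Bool × Int) :
    List (Int × Int) × List (Int × Int) :=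
  match r.2.2.1 with
  | none => (r.1, r.2.1)
  | some rw => if rw then (r.1 ++ [(r.2.2.2, m)], r.2.1) else (r.1, r.2.1 ++ [(r.2.2.2, m)])

theorem corr_fold (pr : List Int) (acc : List Int) :
    pr.foldl (fun acc p => if p < 100 then acc ++ [p] else acc ++ [2 * p]) acc = acc ++ pr.map fCorr := by
  induction pr generalizing acc with
  | nil => simp
  | cons p ps ih => simp [fCorr, ih]; split <;> simp

theorem cls_fold (mt : List Int) (ps : List Int) (i : Int) (d w : List Int) :
    (PySem.List.enumerate (ps.map fCorr) i).foldl
      (fun (s : List Int × List Int) x =>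
        if x.2 > 2 * (PySem.List.pyGet? mt x.1).getD 0 then (s.1, s.2 ++ [x.1])
        else (s.1 ++ [x.1], s.2)) (d, w)
    = (d ++ idxs i false (bitsP mt i ps), w ++ idxs i true (bitsP mt i ps)) := by
  induction ps generalizing i d w with
  | nil => simp [bitsP, idxs]
  | cons p ps ih =>
    simp only [List.map, PySem.List.enumerate_cons, List.foldl_cons, bitsP, idxs]
    by_cases h : fCorr p > 2 * (PySem.List.pyGet? mt i).getD 0
    · simp [h, ih, List.append_assoc]
    · simp [h, ih, List.append_assoc]

theorem idxs_ge (bs : List Bool) (n : Int) (t : Bool) (x : Int) (hx : x ∈ idxs n t bs) : n ≤ x := by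
  induction bs generalizing n with
  | nil => simp [idxs] at hx
  | cons b bs ih =>
    simp only [idxs, List.mem_append] at hx
    rcases hx with h | h
    · split at h <;> simp_all
    · have := ih (n + 1) h; omega

theorem runs_main (cs : List Bool) (t : Bool) :
    (∀ (n start : Int), cgo start n (idxs (n + 1) t cs) = select t (gr start t n cs)) ∧
    (∀ (n s : Int) (b : Bool), b ≠ t → cgoTop (idxs (n + 1) t cs) = select t (gr s b n cs)) := by
  induction cs with
  | nil =>
    constructor
    · intro n start; simp [idxs, cgo, gr, select]
    · intro n s b hb; simp [idxs, cgoTop, gr, select, hb]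
  | cons c cs ih =>
    obtain ⟨ih1, ih2⟩ := ih
    constructor
    · intro n start
      by_cases hc : c = t
      · have : idxs (n + 1) t (c :: cs) = (n + 1) :: idxs (n + 1 + 1) t cs := by simp [idxs, hc]
        rw [this]
        simp only [cgo]
        have hno : ¬ (n + 1 - n ≠ 1) := by omega
        rw [if_neg hno, ih1 (n + 1) start]
        simp [gr, hc]
      · have hbs : idxs (n + 1) t (c :: cs) = idxs (n + 1 + 1) t cs := by
          simp [idxs]; intro h; exact absurd h hc
        rw [hbs]
        have hgr : gr start t n (c :: cs) = (start, n, t) :: gr (n + 1) c (n + 1) cs := by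
          simp [gr]; intro h; exact absurd h hc
        rw [hgr]
        have hsel : select t ((start, n, t) :: gr (n + 1) c (n + 1) cs)
            = (start, n) :: select t (gr (n + 1) c (n + 1) cs) := by simp [select]
        rw [hsel, ← ih2 (n + 1) (n + 1) c hc]
        -- cgo start n l = (start, n) :: cgoTop l when every element of l is ≥ n + 2
        cases hl : idxs (n + 1 + 1) t cs with
        | nil => simp [cgo, cgoTop]
        | cons x xs =>
          have hx : n + 1 + 1 ≤ x := idxs_ge cs (n + 1 + 1) t x (by rw [hl]; exact List.mem_cons_self)
          simp only [cgo, cgoTop]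
          rw [if_pos (by omega)]
    · intro n s b hb
      by_cases hc : c = t
      · have : idxs (n + 1) t (c :: cs) = (n + 1) :: idxs (n + 1 + 1) t cs := by simp [idxs, hc]
        rw [this]
        have hcb : (c == b) = false := by
          cases hcc : c <;> cases hbb : b <;> simp_all
        have hgr : gr s b n (c :: cs) = (s, n, b) :: gr (n + 1) c (n + 1) cs := by
          simp [gr, hcb]
        rw [hgr]
        have hsel : select t ((s, n, b) :: gr (n + 1) c (n + 1) cs)
            = select t (gr (n + 1) c (n + 1) cs) := by simp [select, hb]
        rw [hsel, hc]
        simpa [cgoTop] using ih1 (n + 1) (n + 1)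
      · have hcb : c = b := by
          cases c <;> cases b <;> cases t <;> simp_all
        subst hcb
        have hbs : idxs (n + 1) t (c :: cs) = idxs (n + 1 + 1) t cs := by
          simp [idxs]; intro h; exact absurd h hc
        rw [hbs]
        have hgr : gr s c n (c :: cs) = gr s c (n + 1) cs := by simp [gr]
        rw [hgr]
        exact ih2 (n + 1) s c hc

-- A's compression fold, related to cgo (j ≥ 1; L[j-1] = prev; the rest of L is xs)
theorem aLoop_cgo (L : List Int) (xs : List Int) (j : Nat) (ps : List (Int × Int)) (start prev : Int)
    (hj : 1 ≤ j) (hprev : PySem.List.pyGet? L ((j : Int) - 1) = some prev) (hxs : L.drop j = xs) :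
    aFlush L ((PySem.List.enumerate xs (j : Int)).foldl (aStep L) (ps, [start])) = ps ++ cgo start prev xs := by
  induction xs generalizing j ps start prev with
  | nil =>
    have hlen : (j : Int) - 1 = ((j - 1 : Nat) : Int) := by push_cast [hj]; omega
    rw [hlen, PySem.List.pyGet?_natCast] at hprev
    have hlt : j - 1 < L.length := by
      by_contra h
      simp [List.getElem?_eq_none (le_of_not_gt h)] at hprev
    have hge : L.length ≤ j := by
      have := congrArg List.length hxs; simp at this; omega
    have hjL : j = L.length := by omega
    simp only [PySem.List.enumerate, List.foldl_nil, aFlush, cgo]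
    rw [PySem.List.pyGet?_neg_one]
    have : L.getLast? = some prev := by
      rw [List.getLast?_eq_getElem?, ← hprev]; congr 1; omega
    simp [this, PySem.List.pyGet?, PySem.List.pyIdx?]
  | cons x xs ih =>
    have hx : L[j]? = some x := by
      have : (L.drop j)[0]? = some x := by rw [hxs]; rfl
      simpa [List.getElem?_drop] using this
    have hdrop : L.drop (j + 1) = xs := by
      have : L.drop (j + 1) = (L.drop j).tail := by
        rw [← List.drop_drop]; simp
      rw [this, hxs]; rfl
    rw [PySem.List.enumerate_cons, List.foldl_cons]
    have hj0 : ((j : Int) == 0) = false := by simp; omega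
    simp only [aStep, hj0, Bool.false_eq_true, if_false]
    rw [hprev]
    simp only [Option.getD_some]
    by_cases hgap : x - prev ≠ 1
    · rw [if_pos hgap]
      have hper0 : PySem.List.pyGet? [start, prev] 0 = some start := PySem.List.pyGet?_zero_cons _ _
      have hper1 : PySem.List.pyGet? [start, prev] 1 = some prev := by
        simp [PySem.List.pyGet?, PySem.List.pyIdx?]
      simp only [List.singleton_append, hper0, hper1, Option.getD_some]
      have hx' : PySem.List.pyGet? L (((j + 1 : Nat) : Int) - 1) = some x := by
        rw [show ((j + 1 : Nat) : Int) - 1 = ((j : Nat) : Int) by push_cast; ring,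
          PySem.List.pyGet?_natCast]
        exact hx
      have hrec := ih (j + 1) (ps ++ [(start, prev)]) x x (by omega) hx' hdrop
      push_cast at hrec
      rw [hrec]
      simp [cgo, hgap]
    · rw [if_neg hgap]
      have hx' : PySem.List.pyGet? L (((j + 1 : Nat) : Int) - 1) = some x := by
        have : ((j + 1 : Nat) : Int) - 1 = ((j : Nat) : Int) := by push_cast; ring
        rw [this, PySem.List.pyGet?_natCast]; exact hx
      have hrec := ih (j + 1) ps start x (by omega) hx' hdrop
      push_cast at hrec
      rw [hrec]
      simp [cgo, hgap]

theorem aCompress_eq_cgoTop (L : List Int) : aCompress L = cgoTop L := by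
  cases L with
  | nil => simp [aCompress, cgoTop, PySem.List.enumerate, aFlush]
  | cons x xs =>
    unfold aCompress
    have e0 : PySem.List.enumerate (x :: xs) 0 = ((0 : Int), x) :: PySem.List.enumerate xs ((1 : Nat) : Int) := by
      rw [PySem.List.enumerate_cons]; norm_num
    rw [e0, List.foldl_cons]
    have h0 : aStep (x :: xs) ([], []) ((0 : Int), x) = ([], [x]) := by simp [aStep]
    rw [h0]
    have hprev1 : PySem.List.pyGet? (x :: xs) (((1 : Nat) : Int) - 1) = some x := by
      norm_num [PySem.List.pyGet?_zero_cons]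
    rw [aLoop_cgo (x :: xs) xs 1 [] x x (le_refl 1) hprev1 rfl]
    rfl

-- A's whole pipeline, in terms of the run reference
theorem aSide (mt : List Int) (p : Int) (ps : List Int) :
    distinguish_between_wet_and_dry mt (p :: ps)
      = (select true (gr 0 (decide (fCorr p > 2 * (PySem.List.pyGet? mt 0).getD 0)) 0 (bitsP mt 1 ps)),
         select false (gr 0 (decide (fCorr p > 2 * (PySem.List.pyGet? mt 0).getD 0)) 0 (bitsP mt 1 ps))) := by
  unfold distinguish_between_wet_and_dry
  rw [corr_fold]
  simp only [List.nil_append]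
  rw [cls_fold mt (p :: ps) 0 [] []]
  simp only [List.nil_append, aCompress_eq_cgoTop]
  set b0 := decide (fCorr p > 2 * (PySem.List.pyGet? mt 0).getD 0) with hb0
  have hbits : bitsP mt 0 (p :: ps) = b0 :: bitsP mt (0 + 1) ps := by simp [bitsP, hb0]
  rw [hbits]
  have key : ∀ t : Bool, cgoTop (idxs 0 t (b0 :: bitsP mt (0 + 1) ps)) = select t (gr 0 b0 0 (bitsP mt (0 + 1) ps)) := by
    intro t
    by_cases hb : b0 = t
    · have h1 : idxs 0 t (b0 :: bitsP mt (0 + 1) ps) = 0 :: idxs (0 + 1) t (bitsP mt (0 + 1) ps) := by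
        simp [idxs, hb]
      rw [h1, hb]
      simpa [cgoTop] using (runs_main (bitsP mt (0 + 1) ps) t).1 0 0
    · have : idxs 0 t (b0 :: bitsP mt (0 + 1) ps) = idxs (0 + 1) t (bitsP mt (0 + 1) ps) := by
        simp [idxs]; intro h; exact absurd h hb
      rw [this]
      exact (runs_main (bitsP mt (0 + 1) ps) t).2 0 0 b0 hb
  rw [key true, key false]
  norm_num

-- Source B's loop, in terms of the run reference
theorem bLoop_run (mt : List Int) (ps : List Int) (n s : Int) (b : Bool)
    (wet dry : List (Int × Int)) :
    flushAt (n + (ps.length : Int)) (bLoop mt (n + 1) wet dry (some b) s ps)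
      = (wet ++ select true (gr s b n (bitsP mt (n + 1) ps)),
         dry ++ select false (gr s b n (bitsP mt (n + 1) ps))) := by
  induction ps generalizing n s b wet dry with
  | nil =>
    simp only [bitsP, gr, List.length_nil, Int.natCast_zero, add_zero, bLoop, flushAt]
    cases b <;> simp [select]
  | cons p ps ih =>
    have h2 : n + ((p :: ps).length : Int) = (n + 1) + (ps.length : Int) := by
      simp only [List.length_cons]; push_cast; omega
    have hc2 : decide ((if p < 100 then p else 2 * p) > 2 * (PySem.List.pyGet? mt (n + 1)).getD 0)
        = decide (fCorr p > 2 * (PySem.List.pyGet? mt (n + 1)).getD 0) := rfl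
    have hb1 : bitsP mt (n + 1) (p :: ps)
        = (decide (fCorr p > 2 * (PySem.List.pyGet? mt (n + 1)).getD 0)) :: bitsP mt (n + 1 + 1) ps := rfl
    by_cases hcb : decide (fCorr p > 2 * (PySem.List.pyGet? mt (n + 1)).getD 0) = b
    · have hstep : bLoop mt (n + 1) wet dry (some b) s (p :: ps)
          = bLoop mt (n + 1 + 1) wet dry (some b) s ps := by
        simp only [bLoop, hc2, hcb]
        simp
      have hgr : gr s b n (b :: bitsP mt (n + 1 + 1) ps)
          = gr s b (n + 1) (bitsP mt (n + 1 + 1) ps) := by simp [gr]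
      rw [h2, hstep, ih, hb1, hcb, hgr]
    · cases b with
      | true =>
        have hcf : decide (fCorr p > 2 * (PySem.List.pyGet? mt (n + 1)).getD 0) = false :=
          Bool.eq_false_iff.mpr hcb
        have hstep : bLoop mt (n + 1) wet dry (some true) s (p :: ps)
            = bLoop mt (n + 1 + 1) (wet ++ [(s, n + 1 - 1)]) dry (some false) (n + 1) ps := by
          simp only [bLoop, hc2, hcf]
          simp
        have hgr : gr s true n (false :: bitsP mt (n + 1 + 1) ps)
            = (s, n, true) :: gr (n + 1) false (n + 1) (bitsP mt (n + 1 + 1) ps) := by simp [gr]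
        rw [h2, hstep, ih, hb1, hcf, hgr]
        simp [select, List.append_assoc, show n + 1 - 1 = n from by ring]
      | false =>
        have hct : decide (fCorr p > 2 * (PySem.List.pyGet? mt (n + 1)).getD 0) = true := by
          cases hx : decide (fCorr p > 2 * (PySem.List.pyGet? mt (n + 1)).getD 0) <;> simp_all
        have hstep : bLoop mt (n + 1) wet dry (some false) s (p :: ps)
            = bLoop mt (n + 1 + 1) wet (dry ++ [(s, n + 1 - 1)]) (some true) (n + 1) ps := by
          simp only [bLoop, hc2, hct]
          simp
        have hgr : gr s false n (true :: bitsP mt (n + 1 + 1) ps)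
            = (s, n, false) :: gr (n + 1) true (n + 1) (bitsP mt (n + 1 + 1) ps) := by simp [gr]
        rw [h2, hstep, ih, hb1, hct, hgr]
        simp [select, List.append_assoc, show n + 1 - 1 = n from by ring]

theorem bSide (mt : List Int) (p : Int) (ps : List Int) :
    distinguish_between_wet_and_dry_alt mt (p :: ps)
      = (select true (gr 0 (decide (fCorr p > 2 * (PySem.List.pyGet? mt 0).getD 0)) 0 (bitsP mt 1 ps)),
         select false (gr 0 (decide (fCorr p > 2 * (PySem.List.pyGet? mt 0).getD 0)) 0 (bitsP mt 1 ps))) := by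
  unfold distinguish_between_wet_and_dry_alt
  simp only [bLoop]
  set b0 := decide (fCorr p > 2 * (PySem.List.pyGet? mt 0).getD 0) with hb0
  rw [show (decide ((if p < 100 then p else 2 * p) > 2 * (PySem.List.pyGet? mt 0).getD 0)) = b0 by
    rw [hb0]; rfl]
  have hlen : ((p :: ps).length : Int) - 1 = 0 + (ps.length : Int) := by
    simp only [List.length_cons]; push_cast; ring
  have := bLoop_run mt ps 0 0 b0 [] []
  simp only [zero_add, List.nil_append] at this
  -- the match in _alt over (bLoop …) is exactly flushAt at index len-1
  have hmatch : ∀ (r : List (Int × Int) × List (Int × Int) × Option Bool × Int),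
      (match r.2.2.1 with
       | none => (r.1, r.2.1)
       | some rw => if rw then (r.1 ++ [(r.2.2.2, ((p :: ps).length : Int) - 1)], r.2.1)
                    else (r.1, r.2.1 ++ [(r.2.2.2, ((p :: ps).length : Int) - 1)]))
      = flushAt (((p :: ps).length : Int) - 1) r := by
    intro r; obtain ⟨w, d, rw?, s'⟩ := r
    cases rw? with
    | none => rfl
    | some rw => cases rw <;> rfl
  rw [hmatch, hlen]
  simpa using this

theorem nil_case (mt : List Int) :
    distinguish_between_wet_and_dry mt [] = distinguish_between_wet_and_dry_alt mt [] := by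
  rfl

-- ===== VERDICT (by name: the statement is the Claim_ definition above) =====
theorem distinguish_between_wet_and_dry_spec : Claim_equal_distinguish_between_wet_and_dry := by
  intro mt pr _ _
  unfold Spec_distinguish_between_wet_and_dry
  cases pr with
  | nil => exact nil_case mt
  | cons p ps => rw [aSide, bSide]
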